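-- pv_equiv track=rewrite | github.com/triplebob/emis-xml-convertor | util_modules/ui/tabs/tab_helpers.py | _deduplicate_clinical_data_by_emis_guid
-- ===== SOURCE A (Python) =====
-- def _deduplicate_clinical_data_by_emis_guid(clinical_data):
--     """
--     Remove duplicate clinical codes by EMIS GUID, keeping the best entry for each code.
--
--     Args:
--         clinical_data: List of clinical code dictionaries
--
--     Returns:
--         List of deduplicated clinical code dictionaries
--     """
--     # Group by EMIS GUID
--     guid_groups = {}
--     for code in clinical_data:
--         emis_guid = code.get('EMIS GUID', '')
--         if emis_guid not in guid_groups: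
--             guid_groups[emis_guid] = []
--         guid_groups[emis_guid].append(code)
--
--     # Select best entry from each group
--     deduplicated_codes = []
--     for emis_guid, codes_group in guid_groups.items():
--         best_code = _select_best_clinical_code_entry(codes_group)
--         deduplicated_codes.append(best_code)
--
--     return deduplicated_codes
--
-- def _select_best_clinical_code_entry(codes_group):
--     """
--     Select the best clinical code entry from a group of duplicates.
--
--     Prioritizes:
--     1. Entries with 'Found' mapping status
--     2. Entries with complete descriptions
--     3. Most recent entries
--
--     Args:
--         codes_group: List of clinical code dictionaries with same EMIS GUID
--
--     Returns:
--         Best clinical code dictionary from the group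
--     """
--     if len(codes_group) == 1:
--         return codes_group[0]
--
--     # Priority 1: Found mappings
--     found_codes = [c for c in codes_group if c.get('Mapping Found') == 'Found']
--     if found_codes:
--         codes_group = found_codes
--
--     # Priority 2: Complete descriptions
--     complete_codes = [c for c in codes_group if c.get('Description', '').strip()]
--     if complete_codes:
--         codes_group = complete_codes
--
--     # Priority 3: Most complete entry (most non-empty fields)
--     def completeness_score(code):
--         return sum(1 for v in code.values() if v and str(v).strip())
--
--     return max(codes_group, key=completeness_score)
-- ===== SOURCE B (Python) =====
-- def _deduplicate_clinical_data_by_emis_guid(clinical_data):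
--     """Single-pass dedup: keep, per EMIS GUID, the first code with the lexicographically
--     greatest (mapping-found, has-description, completeness) priority key."""
--     best = {}
--     for code in clinical_data:
--         emis_guid = code.get('EMIS GUID', '')
--         key = (code.get('Mapping Found') == 'Found',
--                bool(code.get('Description', '').strip()),
--                sum(1 for v in code.values() if v and str(v).strip()))
--         entry = best.get(emis_guid)
--         if entry is None or entry[0] < key:
--             best[emis_guid] = (key, code)
--     return [code for _, code in best.values()]
-- ===== Notes on version B (the rewrite author's own statement) =====
-- stated objective: alternative
-- what changed: Replaced the two-phase build-all-GUID-groups-then-cascading-filter selection with a single pass that keeps, per EMIS GUID, the first code whose (mapping-found, has-description, completeness) priority triple is lexicographically maximal.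
import Mathlib
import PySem

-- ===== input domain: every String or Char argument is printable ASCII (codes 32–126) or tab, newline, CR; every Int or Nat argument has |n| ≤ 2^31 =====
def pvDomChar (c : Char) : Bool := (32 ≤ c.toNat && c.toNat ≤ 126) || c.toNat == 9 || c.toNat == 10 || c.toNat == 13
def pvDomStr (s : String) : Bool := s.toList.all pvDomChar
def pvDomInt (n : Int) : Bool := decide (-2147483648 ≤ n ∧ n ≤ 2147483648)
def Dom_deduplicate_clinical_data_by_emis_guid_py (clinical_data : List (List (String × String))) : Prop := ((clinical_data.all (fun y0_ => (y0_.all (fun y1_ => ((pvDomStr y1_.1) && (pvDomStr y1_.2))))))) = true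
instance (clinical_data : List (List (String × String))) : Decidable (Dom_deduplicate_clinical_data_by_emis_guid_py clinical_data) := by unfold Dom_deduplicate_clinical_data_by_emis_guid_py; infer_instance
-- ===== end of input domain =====

-- B replaces A's two-phase group-then-cascading-select with a single pass keeping, per GUID, the
-- first code whose (found, has-description, completeness) priority triple is lexicographically
-- maximal (objective: alternative / single-pass decomposition; return value only — neither mutates).

-- ===== PORT A =====
-- each Python dict argument arrives as an association list; building the dict = PySem.Dict.ofList
def pvScoreA (cd : PySem.Dict String String) : Int :=
  (cd.values.map (fun v => if v ≠ "" ∧ PySem.Str.strip v ≠ "" then (1 : Int) else 0)).sum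

def pvSelectBestA (g : List (PySem.Dict String String)) : PySem.Dict String String :=
  match g with
  | [c] => c                              -- len(codes_group) == 1
  | g =>
    let found := g.filter (fun c => c.get? "Mapping Found" == some "Found")
    let g1 := if found.isEmpty then g else found
    let complete := g1.filter (fun c => !(PySem.Str.strip (c.getD "Description" "") == ""))
    let g2 := if complete.isEmpty then g1 else complete
    match PySem.List.max? g2 pvScoreA with   -- max(codes_group, key=completeness_score)
    | some m => m
    | none => PySem.Dict.empty               -- unreachable: the group is never empty

def deduplicate_clinical_data_by_emis_guid_py (clinical_data : List (List (String × String))) : List (List (String × String)) :=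
  -- guid_groups: 'if guid not in d: d[guid] = []' then append = d.modify guid [] (· ++ [code])
  let guid_groups := clinical_data.foldl
    (fun d code =>
      let cd := PySem.Dict.ofList code
      let emis_guid := cd.getD "EMIS GUID" ""
      d.modify emis_guid [] (fun xs => xs ++ [cd]))
    PySem.Dict.empty
  guid_groups.items.map (fun p => (pvSelectBestA p.2).items)

-- ===== PORT B =====
-- Python tuple '<' on (bool, bool, int), written out component-wise
def pvTupLtB (x y : Bool × Bool × Int) : Bool :=
  (!x.1 && y.1) || (x.1 == y.1 && ((!x.2.1 && y.2.1) || (x.2.1 == y.2.1 && decide (x.2.2 < y.2.2))))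

def pvKeyB (cd : PySem.Dict String String) : Bool × Bool × Int :=
  (cd.get? "Mapping Found" == some "Found",
   !(PySem.Str.strip (cd.getD "Description" "") == ""),
   (cd.values.map (fun v => if v ≠ "" ∧ PySem.Str.strip v ≠ "" then (1 : Int) else 0)).sum)

def deduplicate_clinical_data_by_emis_guid_py_alt (clinical_data : List (List (String × String))) : List (List (String × String)) :=
  let best := clinical_data.foldl
    (fun d code =>
      let cd := PySem.Dict.ofList code
      let emis_guid := cd.getD "EMIS GUID" ""
      let key := pvKeyB cd
      match d.get? emis_guid with
      | none => d.insert emis_guid (key, cd)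
      | some entry => if pvTupLtB entry.1 key then d.insert emis_guid (key, cd) else d)
    PySem.Dict.empty
  best.values.map (fun p => p.2.items)

-- ===== PRECONDITION & SPEC =====
def Spec_deduplicate_clinical_data_by_emis_guid_py (clinical_data : List (List (String × String))) (out : List (List (String × String))) : Prop := out = deduplicate_clinical_data_by_emis_guid_py_alt clinical_data
instance (clinical_data : List (List (String × String))) (out : List (List (String × String))) : Decidable (Spec_deduplicate_clinical_data_by_emis_guid_py clinical_data out) := by unfold Spec_deduplicate_clinical_data_by_emis_guid_py; infer_instance

-- ===== CLAIM (what is proved, stated in full; the proofs are below) =====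
def Claim_equal_deduplicate_clinical_data_by_emis_guid_py : Prop := ∀ (clinical_data : List (List (String × String))), Dom_deduplicate_clinical_data_by_emis_guid_py clinical_data → Spec_deduplicate_clinical_data_by_emis_guid_py clinical_data (deduplicate_clinical_data_by_emis_guid_py clinical_data)

-- ===== LEMMAS AND PROOFS =====

-- the running "best so far" of B, as an option-fold over one GUID's group
def pvStep (lt : PySem.Dict String String → PySem.Dict String String → Bool)
    (o : Option (PySem.Dict String String)) (c : PySem.Dict String String) : Option (PySem.Dict String String) :=
  match o with
  | none => some c
  | some b => if lt b c then some c else some b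

def pvRun (lt : PySem.Dict String String → PySem.Dict String String → Bool)
    (m : List (PySem.Dict String String)) : Option (PySem.Dict String String) :=
  m.foldl (pvStep lt) none

def pvLtFull (b c : PySem.Dict String String) : Bool := pvTupLtB (pvKeyB b) (pvKeyB c)

def pvLt2 (x y : Bool × Int) : Bool := (!x.1 && y.1) || (x.1 == y.1 && decide (x.2 < y.2))

def pvGuid (c : List (String × String)) : String := (PySem.Dict.ofList c).getD "EMIS GUID" ""

def pvGrp (g : String) (l : List (List (String × String))) : List (PySem.Dict String String) :=
  (l.filter (fun c => pvGuid c == g)).map PySem.Dict.ofList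

def pvBest (g : String) (l : List (List (String × String))) : (Bool × Bool × Int) × PySem.Dict String String :=
  match pvRun pvLtFull (pvGrp g l) with
  | some b => (pvKeyB b, b)
  | none => ((false, false, 0), PySem.Dict.empty)

lemma pvFoldl_some (lt : PySem.Dict String String → PySem.Dict String String → Bool) :
    ∀ (m : List (PySem.Dict String String)) (b : PySem.Dict String String),
      ∃ b', m.foldl (pvStep lt) (some b) = some b' := by
  intro m
  induction m with
  | nil => intro b; exact ⟨b, rfl⟩
  | cons c t ih =>
    intro b
    simp only [List.foldl_cons, pvStep]
    split <;> apply ih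

lemma pvRun_some (lt : PySem.Dict String String → PySem.Dict String String → Bool)
    (m : List (PySem.Dict String String)) (h : m ≠ []) :
    ∃ b, pvRun lt m = some b := by
  cases m with
  | nil => exact absurd rfl h
  | cons c t => exact pvFoldl_some lt t c

lemma pvFoldl_congr (lt lt' : PySem.Dict String String → PySem.Dict String String → Bool) :
    ∀ (m : List (PySem.Dict String String)) (b : PySem.Dict String String),
      (∀ x, (x = b ∨ x ∈ m) → ∀ y, (y = b ∨ y ∈ m) → lt x y = lt' x y) →
      m.foldl (pvStep lt) (some b) = m.foldl (pvStep lt') (some b) := by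
  intro m
  induction m with
  | nil => intro b _; rfl
  | cons c t ih =>
    intro b h
    simp only [List.foldl_cons, pvStep]
    have hbc : lt b c = lt' b c := h b (Or.inl rfl) c (Or.inr (List.mem_cons_self ..))
    rw [hbc]
    split
    · exact ih c (fun x hx y hy =>
        h x (Or.inr (by rcases hx with e | e <;> simp [List.mem_cons, e]))
          y (Or.inr (by rcases hy with e | e <;> simp [List.mem_cons, e])))
    · exact ih b (fun x hx y hy => h x (hx.imp id (List.mem_cons_of_mem c))
        y (hy.imp id (List.mem_cons_of_mem c)))

lemma pvRun_congr (lt lt' : PySem.Dict String String → PySem.Dict String String → Bool)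
    (m : List (PySem.Dict String String))
    (h : ∀ x ∈ m, ∀ y ∈ m, lt x y = lt' x y) :
    pvRun lt m = pvRun lt' m := by
  cases m with
  | nil => rfl
  | cons c t =>
    exact pvFoldl_congr lt lt' t c (fun x hx y hy =>
      h x (by rcases hx with h1 | h1 <;> simp [h1]) y (by rcases hy with h1 | h1 <;> simp [h1]))

lemma pvFoldl_filter_true (lt : PySem.Dict String String → PySem.Dict String String → Bool)
    (P : PySem.Dict String String → Bool)
    (hhi : ∀ b c, P b = true → P c = false → lt b c = false) :
    ∀ (m : List (PySem.Dict String String)) (b : PySem.Dict String String), P b = true →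
      m.foldl (pvStep lt) (some b) = (m.filter P).foldl (pvStep lt) (some b) := by
  intro m
  induction m with
  | nil => intro b _; rfl
  | cons c t ih =>
    intro b hb
    by_cases hc : P c = true
    · simp only [List.foldl_cons, List.filter_cons, hc, if_pos, pvStep]
      split
      · exact ih c hc
      · exact ih b hb
    · have hc' : P c = false := by revert hc; cases (P c) <;> simp
      simp only [List.foldl_cons, List.filter_cons, hc', Bool.false_eq_true, pvStep,
        hhi b c hb hc', if_false]
      exact ih b hb

lemma pvFoldl_filter_false (lt : PySem.Dict String String → PySem.Dict String String → Bool)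
    (P : PySem.Dict String String → Bool)
    (hlo : ∀ b c, P b = false → P c = true → lt b c = true)
    (hhi : ∀ b c, P b = true → P c = false → lt b c = false) :
    ∀ (m : List (PySem.Dict String String)) (b : PySem.Dict String String), P b = false →
      m.filter P ≠ [] →
      m.foldl (pvStep lt) (some b) = pvRun lt (m.filter P) := by
  intro m
  induction m with
  | nil => intro b _ h; exact absurd rfl h
  | cons c t ih =>
    intro b hb hne
    by_cases hc : P c = true
    · simp only [List.foldl_cons, List.filter_cons, hc, if_pos, pvStep, hlo b c hb hc]
      exact pvFoldl_filter_true lt P hhi t c hc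
    · have hc' : P c = false := by revert hc; cases (P c) <;> simp
      have hne' : t.filter P ≠ [] := by
        simpa [List.filter_cons, hc'] using hne
      simp only [List.foldl_cons, List.filter_cons, hc', Bool.false_eq_true, pvStep]
      split
      · exact ih c hc' hne'
      · exact ih b hb hne'

lemma pvRun_filter (lt : PySem.Dict String String → PySem.Dict String String → Bool)
    (P : PySem.Dict String String → Bool)
    (hlo : ∀ b c, P b = false → P c = true → lt b c = true)
    (hhi : ∀ b c, P b = true → P c = false → lt b c = false)
    (m : List (PySem.Dict String String)) (hne : m.filter P ≠ []) :
    pvRun lt m = pvRun lt (m.filter P) := by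
  cases m with
  | nil => rfl
  | cons c t =>
    by_cases hc : P c = true
    · have : (c :: t).filter P = c :: t.filter P := by simp [hc]
      rw [this]
      exact pvFoldl_filter_true lt P hhi t c hc
    · have hc' : P c = false := by revert hc; cases (P c) <;> simp
      have hne' : t.filter P ≠ [] := by simpa [List.filter_cons, hc'] using hne
      have : (c :: t).filter P = t.filter P := by simp [hc']
      rw [this]
      exact pvFoldl_filter_false lt P hlo hhi t c hc' hne'

lemma pvRun_max (m : List (PySem.Dict String String)) :
    pvRun (fun b c => decide (pvScoreA b < pvScoreA c)) m = PySem.List.max? m pvScoreA := by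
  simp only [pvRun, PySem.List.max?]
  congr 1
  funext o c
  cases o with
  | none => rfl
  | some b => simp [pvStep]

def pvP1 (c : PySem.Dict String String) : Bool := c.get? "Mapping Found" == some "Found"
def pvP2 (c : PySem.Dict String String) : Bool := !(PySem.Str.strip (c.getD "Description" "") == "")
def pvLtSnd (b c : PySem.Dict String String) : Bool := pvLt2 (pvKeyB b).2 (pvKeyB c).2
def pvLtScore (b c : PySem.Dict String String) : Bool := decide (pvScoreA b < pvScoreA c)

lemma pvTupLt_lo (x y : Bool × Bool × Int) (hx : x.1 = false) (hy : y.1 = true) :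
    pvTupLtB x y = true := by simp [pvTupLtB, hx, hy]
lemma pvTupLt_hi (x y : Bool × Bool × Int) (hx : x.1 = true) (hy : y.1 = false) :
    pvTupLtB x y = false := by simp [pvTupLtB, hx, hy]
lemma pvTupLt_eq (x y : Bool × Bool × Int) (h : x.1 = y.1) :
    pvTupLtB x y = pvLt2 x.2 y.2 := by
  cases hy : y.1 <;> rw [hy] at h <;> simp [pvTupLtB, pvLt2, h, hy]
lemma pvLt2_lo (x y : Bool × Int) (hx : x.1 = false) (hy : y.1 = true) :
    pvLt2 x y = true := by simp [pvLt2, hx, hy]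
lemma pvLt2_hi (x y : Bool × Int) (hx : x.1 = true) (hy : y.1 = false) :
    pvLt2 x y = false := by simp [pvLt2, hx, hy]
lemma pvLt2_eq (x y : Bool × Int) (h : x.1 = y.1) :
    pvLt2 x y = decide (x.2 < y.2) := by
  cases hy : y.1 <;> rw [hy] at h <;> simp [pvLt2, h, hy]

-- the constant-first-component reductions, lifted to the dict comparators
lemma pvLtFull_eq_snd (b c : PySem.Dict String String) (h : pvP1 b = pvP1 c) :
    pvLtFull b c = pvLtSnd b c :=
  pvTupLt_eq (pvKeyB b) (pvKeyB c) h
lemma pvLtSnd_eq_score (b c : PySem.Dict String String) (h : pvP2 b = pvP2 c) :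
    pvLtSnd b c = pvLtScore b c :=
  pvLt2_eq (pvKeyB b).2 (pvKeyB c).2 h

-- one cascade stage: filtering by P (when non-trivial) and then comparing one level down
lemma pvStage (lt lt' : PySem.Dict String String → PySem.Dict String String → Bool)
    (P : PySem.Dict String String → Bool)
    (hlo : ∀ b c, P b = false → P c = true → lt b c = true)
    (hhi : ∀ b c, P b = true → P c = false → lt b c = false)
    (heq : ∀ b c, P b = P c → lt b c = lt' b c)
    (m : List (PySem.Dict String String)) :
    pvRun lt m = pvRun lt' (if (m.filter P).isEmpty then m else m.filter P) := by
  by_cases he : (m.filter P).isEmpty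
  · rw [if_pos he]
    have hall : ∀ c ∈ m, P c = false := by
      intro c hc
      by_contra hne
      have : c ∈ m.filter P := List.mem_filter.mpr ⟨hc, by revert hne; cases (P c) <;> simp⟩
      rw [List.isEmpty_iff.mp he] at this
      exact absurd this (List.not_mem_nil)
    exact pvRun_congr _ _ m (fun b hb c hc => heq b c (by rw [hall b hb, hall c hc]))
  · rw [if_neg he, pvRun_filter lt P hlo hhi m (by simpa [List.isEmpty_iff] using he)]
    exact pvRun_congr _ _ _ (fun b hb c hc =>
      heq b c (by rw [(List.mem_filter.mp hb).2, (List.mem_filter.mp hc).2]))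

set_option maxHeartbeats 1000000 in
lemma pvRun_chain (m : List (PySem.Dict String String)) :
    (pvRun pvLtFull m).getD PySem.Dict.empty =
      match PySem.List.max?
        (if (((if (m.filter pvP1).isEmpty then m else m.filter pvP1).filter pvP2).isEmpty)
         then (if (m.filter pvP1).isEmpty then m else m.filter pvP1)
         else (if (m.filter pvP1).isEmpty then m else m.filter pvP1).filter pvP2)
        pvScoreA with
      | some x => x
      | none => PySem.Dict.empty := by
  rw [pvStage pvLtFull pvLtSnd pvP1 (fun b c hb hc => pvTupLt_lo _ _ hb hc)
        (fun b c hb hc => pvTupLt_hi _ _ hb hc) (fun b c h => pvLtFull_eq_snd b c h) m]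
  rw [pvStage pvLtSnd pvLtScore pvP2 (fun b c hb hc => pvLt2_lo _ _ hb hc)
        (fun b c hb hc => pvLt2_hi _ _ hb hc) (fun b c h => pvLtSnd_eq_score b c h)
        (if (m.filter pvP1).isEmpty then m else m.filter pvP1)]
  rw [show pvLtScore = (fun b c => decide (pvScoreA b < pvScoreA c)) from rfl]
  rw [pvRun_max]
  cases PySem.List.max?
      (if (((if (m.filter pvP1).isEmpty then m else m.filter pvP1).filter pvP2).isEmpty)
       then (if (m.filter pvP1).isEmpty then m else m.filter pvP1)
       else (if (m.filter pvP1).isEmpty then m else m.filter pvP1).filter pvP2)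
      pvScoreA <;> rfl

lemma pvSelect_eq_run (m : List (PySem.Dict String String)) :
    pvSelectBestA m = (pvRun pvLtFull m).getD PySem.Dict.empty := by
  match m with
  | [] => rfl
  | [c] => rfl
  | a :: b :: t =>
    rw [pvRun_chain]
    rfl

lemma pvGet?_mapped (ks : List String) (F : String → (Bool × Bool × Int) × PySem.Dict String String) (x : String) :
    (PySem.Dict.mk (ks.map (fun k => (k, F k)))).get? x = if x ∈ ks then some (F x) else none := by
  induction ks with
  | nil => simp [PySem.Dict.get?]
  | cons k t ih =>
    rw [List.map_cons, PySem.Dict.get?_mk_cons]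
    by_cases hk : k = x
    · simp [hk]
    · have : (k == x) = false := by simp [hk]
      simp only [this, Bool.false_eq_true, ih, List.mem_cons]
      by_cases hx : x ∈ t <;> simp [hx, Ne.symm hk]

lemma pvGrp_append (g : String) (l : List (List (String × String))) (c : List (String × String)) :
    pvGrp g (l ++ [c]) = pvGrp g l ++ (if pvGuid c == g then [PySem.Dict.ofList c] else []) := by
  simp only [pvGrp, List.filter_append]
  split <;> rename_i h <;> simp [h]

lemma pvGrp_nil_iff (g : String) (l : List (List (String × String))) :
    pvGrp g l = [] ↔ g ∉ PySem.Set.ofList (l.map pvGuid) := by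
  simp only [pvGrp, List.map_eq_nil_iff, List.filter_eq_nil_iff, PySem.Set.mem_ofList,
    List.mem_map, beq_iff_eq]
  push Not
  constructor
  · intro h x hx
    exact h x hx
  · intro h c hc
    exact h c hc

lemma pvRun_append (lt : PySem.Dict String String → PySem.Dict String String → Bool)
    (m : List (PySem.Dict String String)) (c : PySem.Dict String String) :
    pvRun lt (m ++ [c]) = pvStep lt (pvRun lt m) c := by
  simp [pvRun]

lemma pvBest_ne (g : String) (l : List (List (String × String))) (c : List (String × String))
    (h : pvGuid c ≠ g) : pvBest g (l ++ [c]) = pvBest g l := by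
  rw [pvBest, pvBest, pvGrp_append]
  have : (pvGuid c == g) = false := by simp [h]
  rw [this]
  simp

lemma pvBest_new (l : List (List (String × String))) (c : List (String × String))
    (h : pvGrp (pvGuid c) l = []) :
    pvBest (pvGuid c) (l ++ [c]) = (pvKeyB (PySem.Dict.ofList c), PySem.Dict.ofList c) := by
  rw [pvBest, pvGrp_append, h]
  simp [pvRun, pvStep]

lemma pvB_step (l : List (List (String × String))) (c : List (String × String))
    (D : PySem.Dict String ((Bool × Bool × Int) × PySem.Dict String String))
    (hD : D.items = (PySem.Set.ofList (l.map pvGuid)).map (fun g => (g, pvBest g l))) :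
    (let cd := PySem.Dict.ofList c
     let emis_guid := cd.getD "EMIS GUID" ""
     let key := pvKeyB cd
     match D.get? emis_guid with
     | none => D.insert emis_guid (key, cd)
     | some entry => if pvTupLtB entry.1 key then D.insert emis_guid (key, cd) else D).items
    = (PySem.Set.ofList ((l ++ [c]).map pvGuid)).map (fun g => (g, pvBest g (l ++ [c]))) := by
  have hDmk : D = PySem.Dict.mk ((PySem.Set.ofList (l.map pvGuid)).map (fun g => (g, pvBest g l))) :=
    PySem.Dict.ext hD
  show (match D.get? (pvGuid c) with
     | none => D.insert (pvGuid c) (pvKeyB (PySem.Dict.ofList c), PySem.Dict.ofList c)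
     | some entry =>
        if pvTupLtB entry.1 (pvKeyB (PySem.Dict.ofList c))
        then D.insert (pvGuid c) (pvKeyB (PySem.Dict.ofList c), PySem.Dict.ofList c) else D).items
    = (PySem.Set.ofList ((l ++ [c]).map pvGuid)).map (fun g => (g, pvBest g (l ++ [c])))
  have hget : D.get? (pvGuid c) =
      if pvGuid c ∈ PySem.Set.ofList (l.map pvGuid)
      then some (pvBest (pvGuid c) l) else none := by
    rw [hDmk]; exact pvGet?_mapped _ _ _
  have hset : PySem.Set.ofList ((l ++ [c]).map pvGuid)
      = (PySem.Set.ofList (l.map pvGuid)).add (pvGuid c) := by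
    rw [List.map_append, List.map_singleton, PySem.Set.ofList_append_singleton]
  by_cases hg : pvGuid c ∈ PySem.Set.ofList (l.map pvGuid)
  · -- seen GUID: compare with the stored best
    have hgrp : pvGrp (pvGuid c) l ≠ [] := fun h0 => ((pvGrp_nil_iff _ l).mp h0) hg
    obtain ⟨b0, hb0⟩ := pvRun_some pvLtFull (pvGrp (pvGuid c) l) hgrp
    have hbest : pvBest (pvGuid c) l = (pvKeyB b0, b0) := by rw [pvBest, hb0]
    have hbest' : pvBest (pvGuid c) (l ++ [c]) =
        if pvLtFull b0 (PySem.Dict.ofList c)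
        then (pvKeyB (PySem.Dict.ofList c), PySem.Dict.ofList c) else (pvKeyB b0, b0) := by
      rw [pvBest, pvGrp_append]
      have : (pvGuid c == pvGuid c) = true := by simp
      rw [this, if_pos rfl, pvRun_append, hb0]
      show (match (if pvLtFull b0 (PySem.Dict.ofList c)
          then some (PySem.Dict.ofList c) else some b0) with
        | some b => (pvKeyB b, b)
        | none => ((false, false, 0), PySem.Dict.empty)) = _
      by_cases hlt : pvLtFull b0 (PySem.Dict.ofList c) <;> simp [hlt]
    rw [hget, if_pos hg, hbest]
    show (if pvLtFull b0 (PySem.Dict.ofList c)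
        then D.insert (pvGuid c) (pvKeyB (PySem.Dict.ofList c), PySem.Dict.ofList c) else D).items = _
    have hcont : D.contains (pvGuid c) = true := by
      rw [PySem.Dict.contains_eq_isSome_get?, hget, if_pos hg]; rfl
    rw [hset, PySem.Set.add_of_mem hg]
    by_cases hlt : pvLtFull b0 (PySem.Dict.ofList c)
    · rw [if_pos hlt, PySem.Dict.items_insert_of_contains D _ hcont, hD, List.map_map]
      apply List.map_congr_left
      intro g hgm
      by_cases hgg : g = pvGuid c
      · subst hgg
        simp only [Function.comp, BEq.rfl, if_pos]
        rw [hbest', if_pos hlt]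
      · have : (g == pvGuid c) = false := by simp [hgg]
        simp [Function.comp, this, pvBest_ne g l c (fun h => hgg h.symm)]
    · rw [if_neg hlt, hD]
      apply List.map_congr_left
      intro g hgm
      by_cases hgg : g = pvGuid c
      · subst hgg
        rw [hbest', if_neg hlt, hbest]
      · rw [pvBest_ne g l c (fun h => hgg h.symm)]
  · -- fresh GUID: append
    rw [hget, if_neg hg]
    show (D.insert (pvGuid c) (pvKeyB (PySem.Dict.ofList c), PySem.Dict.ofList c)).items = _
    have hcont : D.contains (pvGuid c) = false := by
      rw [PySem.Dict.contains_eq_isSome_get?, hget, if_neg hg]; rfl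
    rw [PySem.Dict.items_insert_of_not_contains D _ hcont, hD, hset, PySem.Set.add_of_not_mem hg,
      List.map_append, List.map_singleton]
    congr 1
    · apply List.map_congr_left
      intro g hgm
      have hne : pvGuid c ≠ g := fun h => hg (h ▸ hgm)
      rw [pvBest_ne g l c hne]
    · rw [pvBest_new l c ((pvGrp_nil_iff _ l).mpr hg)]

lemma pvB_items (l : List (List (String × String))) :
    (l.foldl
      (fun d code =>
        let cd := PySem.Dict.ofList code
        let emis_guid := cd.getD "EMIS GUID" ""
        let key := pvKeyB cd
        match d.get? emis_guid with
        | none => d.insert emis_guid (key, cd)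
        | some entry => if pvTupLtB entry.1 key then d.insert emis_guid (key, cd) else d)
      PySem.Dict.empty).items
    = (PySem.Set.ofList (l.map pvGuid)).map (fun g => (g, pvBest g l)) := by
  induction l using List.reverseRecOn with
  | nil => rfl
  | append_singleton l c ih =>
    rw [List.foldl_append, List.foldl_cons, List.foldl_nil]
    exact pvB_step l c _ ih

lemma pvA_items (l : List (List (String × String))) :
    (l.foldl
      (fun d code =>
        let cd := PySem.Dict.ofList code
        let emis_guid := cd.getD "EMIS GUID" ""
        d.modify emis_guid [] (fun xs => xs ++ [cd]))
      PySem.Dict.empty).items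
    = (PySem.Set.ofList (l.map pvGuid)).map (fun g => (g, pvGrp g l)) := by
  have hfold :
      (l.foldl
        (fun d code =>
          let cd := PySem.Dict.ofList code
          let emis_guid := cd.getD "EMIS GUID" ""
          d.modify emis_guid [] (fun xs => xs ++ [cd]))
        PySem.Dict.empty)
      = (l.map (fun c => (pvGuid c, PySem.Dict.ofList c))).foldl
          (fun d p => d.modify p.1 [] (fun xs => xs ++ [p.2])) PySem.Dict.empty := by
    rw [List.foldl_map]
    rfl
  rw [hfold]
  have hkeys := PySem.Dict.keys_foldl_modify_key
    (l.map (fun c => (pvGuid c, PySem.Dict.ofList c))) (fun p => p.1) ([] : List (PySem.Dict String String))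
    (fun _ p => fun xs => xs ++ [p.2]) PySem.Dict.empty
  have hkeys' : ((l.map (fun c => (pvGuid c, PySem.Dict.ofList c))).foldl
      (fun d p => d.modify p.1 [] (fun xs => xs ++ [p.2])) PySem.Dict.empty).keys
      = PySem.Set.ofList (l.map pvGuid) := by
    rw [hkeys]
    simp only [PySem.Dict.keys_empty, PySem.Set.update_nil_left, List.map_map]
    rfl
  have hnd : ((l.map (fun c => (pvGuid c, PySem.Dict.ofList c))).foldl
      (fun d p => d.modify p.1 [] (fun xs => xs ++ [p.2])) PySem.Dict.empty).keys.Nodup := by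
    rw [hkeys']
    exact PySem.Set.nodup_ofList _
  rw [PySem.Dict.items_eq_map_keys _ hnd ([] : List (PySem.Dict String String)), hkeys']
  apply List.map_congr_left
  intro g _
  have hgetD := PySem.Dict.getD_foldl_modify_append
    (l.map (fun c => (pvGuid c, PySem.Dict.ofList c))) PySem.Dict.empty g
  rw [hgetD]
  simp only [PySem.Dict.getD_empty, List.nil_append, List.filter_map, List.map_map]
  rfl

-- ===== VERDICT (by name: the statement is the Claim_ definition above) =====
theorem deduplicate_clinical_data_by_emis_guid_py_spec : Claim_equal_deduplicate_clinical_data_by_emis_guid_py := by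
  intro l _
  show deduplicate_clinical_data_by_emis_guid_py l = deduplicate_clinical_data_by_emis_guid_py_alt l
  rw [deduplicate_clinical_data_by_emis_guid_py, deduplicate_clinical_data_by_emis_guid_py_alt]
  simp only [PySem.Dict.values, pvA_items, pvB_items, List.map_map]
  apply List.map_congr_left
  intro g hg
  simp only [Function.comp]
  have hne : pvGrp g l ≠ [] := by
    intro h0
    exact ((pvGrp_nil_iff g l).mp h0) hg
  obtain ⟨b0, hb0⟩ := pvRun_some pvLtFull (pvGrp g l) hne
  have : pvBest g l = (pvKeyB b0, b0) := by rw [pvBest, hb0]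
  rw [this, pvSelect_eq_run, hb0]
  rfl
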